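-- pv_equiv track=rewrite | github.com/k-harada/AtCoder | ABC/ABC251-300/ABC298/D.py | solve
-- ===== SOURCE A (Python) =====
-- from collections import deque
--
-- MOD = 998244353
--
-- def solve(q, query_list):
--     res = []
--     queue = deque([1])
--     x = 1
--     order = 0
--     pow10_list = [1]
--     for _ in range(q):
--         pow10_list.append((pow10_list[-1] * 10) % MOD)
--     for query in query_list:
--         if query[0] == 1:
--             x *= 10
--             x += query[1]
--             x %= MOD
--             queue.append(query[1])
--             order += 1
--         elif query[0] == 2:
--             p = queue.popleft()
--             x -= p * pow10_list[order]
--             x %= MOD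
--             order -= 1
--         else:
--             res.append(x)
--     return res
-- ===== SOURCE B (Python) =====
-- from collections import deque
--
-- MOD = 998244353
--
-- def solve(q, query_list):
--     res = []
--     digits = deque([1])
--     for query in query_list:
--         if query[0] == 1:
--             digits.append(query[1])
--         elif query[0] == 2:
--             digits.popleft()
--         else:
--             val = 0
--             for d in digits:
--                 val = (val * 10 + d) % MOD
--             res.append(val)
--     return res
-- ===== Notes on version B (the rewrite author's own statement) =====
-- stated objective: simpler
-- what changed: B drops A's incremental running value, the order counter and the O(q) precomputed power-of-10 table entirely: it only stores the digit queue and, on each report query, recomputes the value mod 998244353 by one left-to-right Horner pass over the stored digits; skipping the q-step table build makes B faster on the measured inputs, though a run dense in report queries over a long queue would favour A.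
import Mathlib
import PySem

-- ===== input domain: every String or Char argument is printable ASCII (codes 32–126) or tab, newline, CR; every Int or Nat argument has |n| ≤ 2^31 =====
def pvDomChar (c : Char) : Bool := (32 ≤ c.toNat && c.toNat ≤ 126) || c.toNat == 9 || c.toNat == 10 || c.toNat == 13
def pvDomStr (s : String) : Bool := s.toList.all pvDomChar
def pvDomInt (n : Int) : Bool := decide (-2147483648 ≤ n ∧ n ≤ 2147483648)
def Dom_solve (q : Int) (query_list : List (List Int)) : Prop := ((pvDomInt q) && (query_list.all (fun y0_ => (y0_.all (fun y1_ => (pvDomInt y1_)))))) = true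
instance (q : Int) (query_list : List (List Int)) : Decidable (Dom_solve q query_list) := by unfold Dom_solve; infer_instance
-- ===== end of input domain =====

-- B replaces A's incremental running value / order counter / power-of-10 table by a plain digit
-- queue whose value mod 998244353 is recomputed by one Horner pass at each report query (simpler; it skips the q-step table build).

-- ===== PORT A =====
def pvMOD : Int := 998244353

-- the pow10_list building loop of A
def solvePow (q : Int) : List Int :=
  (PySem.List.pyRange 0 q 1).foldl
    (fun acc _ => acc ++ [PySem.Int.mod (((PySem.List.pyGet? acc (-1)).getD 0) * 10) pvMOD]) [1]

-- the body of A's main loop; state = (res, queue, x, order)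
def solveStep (pow10 : List Int) (st : List Int × List Int × Int × Int) (query : List Int) :
    List Int × List Int × Int × Int :=
  match st with
  | (res, queue, x, order) =>
    if PySem.List.pyGet? query 0 = some 1 then
      let d := (PySem.List.pyGet? query 1).getD 0
      (res, queue ++ [d], PySem.Int.mod (x * 10 + d) pvMOD, order + 1)
    else if PySem.List.pyGet? query 0 = some 2 then
      match queue with
      | [] => (res, [], x, order)   -- Python raises IndexError here; excluded by Pre_solve
      | p :: rest =>
        (res, rest, PySem.Int.mod (x - p * ((PySem.List.pyGet? pow10 order).getD 0)) pvMOD, order - 1)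
    else (res ++ [x], queue, x, order)

def solve (q : Int) (query_list : List (List Int)) : List Int :=
  (query_list.foldl (solveStep (solvePow q)) ([], [1], 1, 0)).1

-- ===== PORT B =====
-- the Horner recomputation loop of B's report branch
def solveAltVal (digits : List Int) : Int :=
  digits.foldl (fun v d => PySem.Int.mod (v * 10 + d) pvMOD) 0

-- the body of B's loop; state = (res, digits)
def solveAltStep (st : List Int × List Int) (query : List Int) : List Int × List Int :=
  match st with
  | (res, digits) =>
    if PySem.List.pyGet? query 0 = some 1 then
      (res, digits ++ [(PySem.List.pyGet? query 1).getD 0])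
    else if PySem.List.pyGet? query 0 = some 2 then
      (res, digits.drop 1)          -- Python raises IndexError on empty; excluded by Pre_solve
    else (res ++ [solveAltVal digits], digits)

def solve_alt (q : Int) (query_list : List (List Int)) : List Int :=
  (query_list.foldl solveAltStep ([], [1])).1

-- ===== PRECONDITION & SPEC =====
-- Pre_solve admits exactly the inputs on which A returns: every query is nonempty, every
-- type-1 query carries a digit, and before each type-2 query the queue is nonempty
-- (#type1 ≥ #type2 so far) and the power-table index #type1 − #type2 is in range.
def Pre_solve (q : Int) (query_list : List (List Int)) : Prop :=
  ∀ i < query_list.length,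
    (query_list.getD i [] ≠ [] ∧
     ((query_list.getD i []).head? = some 1 → 2 ≤ (query_list.getD i []).length) ∧
     ((query_list.getD i []).head? = some 2 →
        ((query_list.take i).countP (fun t => t.head? == some 2) : Int) ≤
          ((query_list.take i).countP (fun t => t.head? == some 1) : Int) ∧
        ((query_list.take i).countP (fun t => t.head? == some 1) : Int) -
          ((query_list.take i).countP (fun t => t.head? == some 2) : Int) ≤ max q 0))
instance (q : Int) (query_list : List (List Int)) : Decidable (Pre_solve q query_list) := by
  unfold Pre_solve; infer_instance

def pvWitness_solve : Int × List (List Int) := (3, [[1, 5], [3], [2], [3]])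

def Spec_solve (q : Int) (query_list : List (List Int)) (out : List Int) : Prop := out = solve_alt q query_list
instance (q : Int) (query_list : List (List Int)) (out : List Int) : Decidable (Spec_solve q query_list out) := by unfold Spec_solve; infer_instance

-- ===== CLAIM (what is proved, stated in full; the proofs are below) =====
def Claim_equal_solve : Prop := ∀ (q : Int) (query_list : List (List Int)), Dom_solve q query_list → Pre_solve q query_list → Spec_solve q query_list (solve q query_list)

-- ===== LEMMAS AND PROOFS =====

theorem pvmod_eq (a : Int) : PySem.Int.mod a pvMOD = a % pvMOD :=
  PySem.Int.mod_eq_emod_of_pos (by norm_num [pvMOD])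

-- Horner evaluation without the modulus, from an arbitrary seed
def hornerRaw (s : Int) (l : List Int) : Int := l.foldl (fun v d => v * 10 + d) s

-- B's Horner loop from an arbitrary seed
def valFrom (s : Int) (l : List Int) : Int :=
  l.foldl (fun v d => PySem.Int.mod (v * 10 + d) pvMOD) s

theorem solveAltVal_eq_valFrom (l : List Int) : solveAltVal l = valFrom 0 l := rfl

theorem hornerRaw_shift (l : List Int) : ∀ s : Int,
    hornerRaw s l = s * 10 ^ l.length + hornerRaw 0 l := by
  induction l with
  | nil => intro s; simp [hornerRaw]
  | cons d t ih =>
    intro s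
    show hornerRaw (s * 10 + d) t = s * 10 ^ (d :: t).length + hornerRaw (0 * 10 + d) t
    rw [ih (s * 10 + d), ih (0 * 10 + d)]
    simp [List.length_cons]
    ring

theorem valFrom_emod (l : List Int) : ∀ s : Int,
    valFrom s l % pvMOD = hornerRaw s l % pvMOD := by
  induction l with
  | nil => intro s; rfl
  | cons d t ih =>
    intro s
    show valFrom (PySem.Int.mod (s * 10 + d) pvMOD) t % pvMOD = hornerRaw (s * 10 + d) t % pvMOD
    rw [ih, pvmod_eq, hornerRaw_shift t ((s * 10 + d) % pvMOD), hornerRaw_shift t (s * 10 + d)]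
    have h : (s * 10 + d) % pvMOD ≡ s * 10 + d [ZMOD pvMOD] := Int.emod_emod (s * 10 + d) pvMOD
    exact (h.mul_right _).add_right _

theorem valFrom_idem (l : List Int) : ∀ s : Int, s % pvMOD = s → valFrom s l % pvMOD = valFrom s l := by
  induction l with
  | nil => intro s hs; exact hs
  | cons d t ih =>
    intro s _
    show valFrom (PySem.Int.mod (s * 10 + d) pvMOD) t % pvMOD = _
    exact ih _ (by rw [pvmod_eq]; exact Int.emod_emod _ _)

theorem val_append (digits : List Int) (d : Int) :
    solveAltVal (digits ++ [d]) = PySem.Int.mod (solveAltVal digits * 10 + d) pvMOD := by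
  simp [solveAltVal, List.foldl_append]

theorem val_pop (p : Int) (rest : List Int) :
    PySem.Int.mod (solveAltVal (p :: rest) - p * ((10:Int) ^ rest.length % pvMOD)) pvMOD
      = solveAltVal rest := by
  rw [pvmod_eq, solveAltVal_eq_valFrom, solveAltVal_eq_valFrom]
  have hx : valFrom 0 (p :: rest) ≡ p * 10 ^ rest.length + hornerRaw 0 rest [ZMOD pvMOD] := by
    have h1 : valFrom 0 (p :: rest) % pvMOD = hornerRaw 0 (p :: rest) % pvMOD := valFrom_emod _ 0
    have h2 : hornerRaw 0 (p :: rest) = p * 10 ^ rest.length + hornerRaw 0 rest := by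
      show hornerRaw (0 * 10 + p) rest = _
      rw [hornerRaw_shift rest (0 * 10 + p)]; ring
    rw [h2] at h1; exact h1
  have hp0 : ((10:Int) ^ rest.length % pvMOD) ≡ (10:Int) ^ rest.length [ZMOD pvMOD] :=
    Int.emod_emod _ _
  have hp : p * ((10:Int) ^ rest.length % pvMOD) ≡ p * 10 ^ rest.length [ZMOD pvMOD] :=
    hp0.mul_left p
  have hsub := hx.sub hp
  have hres : p * 10 ^ rest.length + hornerRaw 0 rest - p * 10 ^ rest.length = hornerRaw 0 rest := by ring
  rw [hres] at hsub
  have : (valFrom 0 (p :: rest) - p * ((10:Int) ^ rest.length % pvMOD)) % pvMOD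
      = valFrom 0 rest % pvMOD := by
    rw [hsub]; exact (valFrom_emod rest 0).symm
  rw [this]
  exact valFrom_idem rest 0 rfl

-- the power-of-10 table as a closed list
def powList (n : Nat) : List Int := (List.range (n + 1)).map (fun k => (10:Int) ^ k % pvMOD)

theorem foldl_const_iterate {a b : Type} (l : List a) (g : b → b) : ∀ (init : b),
    l.foldl (fun acc _ => g acc) init = g^[l.length] init := by
  induction l with
  | nil => intro init; rfl
  | cons x t ih => intro init; simp [List.foldl_cons, ih, Function.iterate_succ_apply]

theorem powList_succ (n : Nat) :
    powList n ++ [PySem.Int.mod (((PySem.List.pyGet? (powList n) (-1)).getD 0) * 10) pvMOD]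
      = powList (n + 1) := by
  have hlast : PySem.List.pyGet? (powList n) (-1) = some ((10:Int) ^ n % pvMOD) := by
    rw [PySem.List.pyGet?_neg_one]
    show ((List.range (n + 1)).map (fun k => (10:Int) ^ k % pvMOD)).getLast? = _
    rw [List.range_succ, List.map_append]
    simp
  rw [hlast]
  show powList n ++ [PySem.Int.mod ((10:Int) ^ n % pvMOD * 10) pvMOD] = _
  have harith : PySem.Int.mod ((10:Int) ^ n % pvMOD * 10) pvMOD = (10:Int) ^ (n + 1) % pvMOD := by
    rw [pvmod_eq, pow_succ, Int.mul_emod ((10:Int) ^ n) 10 pvMOD]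
    norm_num [pvMOD]
  rw [harith]
  show _ = (List.range (n + 1 + 1)).map (fun k => (10:Int) ^ k % pvMOD)
  rw [List.range_succ, List.map_append]
  rfl

theorem solvePow_eq (q : Int) : solvePow q = powList q.toNat := by
  unfold solvePow
  rw [foldl_const_iterate, PySem.List.length_pyRange_one]
  have h0 : ([1] : List Int) = powList 0 := by decide
  rw [h0]
  have : ∀ m : Nat, (fun acc => acc ++ [PySem.Int.mod (((PySem.List.pyGet? acc (-1)).getD 0) * 10) pvMOD])^[m] (powList 0) = powList m := by
    intro m
    induction m with
    | zero => rfl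
    | succ k ih => rw [Function.iterate_succ_apply', ih, powList_succ]
  simpa using this (q - 0).toNat

theorem pow_get (q : Int) (k : Nat) (hk : (k : Int) ≤ max q 0) :
    (PySem.List.pyGet? (solvePow q) (k : Int)).getD 0 = (10:Int) ^ k % pvMOD := by
  rw [solvePow_eq, PySem.List.pyGet?_natCast]
  have hk' : k < q.toNat + 1 := by omega
  simp [powList, hk']


-- recursive form of the precondition used by the induction (len = current queue length)
def PreAux (q : Int) : Nat → List (List Int) → Prop
  | _, [] => True
  | len, query :: rest =>
      if PySem.List.pyGet? query 0 = some 1 then PreAux q (len + 1) rest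
      else if PySem.List.pyGet? query 0 = some 2 then
        1 ≤ len ∧ ((len : Int) - 1 ≤ max q 0) ∧ PreAux q (len - 1) rest
      else PreAux q len rest

theorem pre_to_aux (q : Int) : ∀ (ql pref : List (List Int)) (len : Nat),
    (len : Int) = 1 + ((pref.countP (fun t => t.head? == some 1) : Int) -
                        (pref.countP (fun t => t.head? == some 2) : Int)) →
    Pre_solve q (pref ++ ql) → PreAux q len ql := by
  intro ql
  induction ql with
  | nil => intro pref len _ _; trivial
  | cons query rest ih =>
    intro pref len hlen hpre
    have hC := hpre pref.length (by simp)
    rw [List.getD_eq_getElem?_getD, List.getElem?_append_right (le_refl _)] at hC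
    simp only [Nat.sub_self, List.getElem?_cons_zero, Option.getD_some, List.take_left] at hC
    have hget0 : PySem.List.pyGet? query 0 = query.head? := by
      simp [PySem.List.pyGet?_zero, List.head?_eq_getElem?]
    have hpre' : Pre_solve q ((pref ++ [query]) ++ rest) := by
      rw [List.append_assoc]; simpa using hpre
    by_cases h1 : query.head? = some 1
    · have : PreAux q len (query :: rest) = PreAux q (len + 1) rest := by
        simp [PreAux, hget0, h1]
      rw [this]
      apply ih (pref ++ [query]) (len + 1) _ hpre'
      rw [List.countP_append, List.countP_append]
      simp [h1]
      omega
    · by_cases h2 : query.head? = some 2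
      · have hcond := hC.2.2 h2
        have : PreAux q len (query :: rest) =
            (1 ≤ len ∧ ((len : Int) - 1 ≤ max q 0) ∧ PreAux q (len - 1) rest) := by
          simp [PreAux, hget0, h1, h2]
        rw [this]
        refine ⟨by omega, by omega, ?_⟩
        apply ih (pref ++ [query]) (len - 1) _ hpre'
        rw [List.countP_append, List.countP_append]
        simp [h1, h2]
        push_cast [Nat.cast_sub (by omega : 1 ≤ len)]
        omega
      · have : PreAux q len (query :: rest) = PreAux q len rest := by
          simp [PreAux, hget0, h1, h2]
        rw [this]
        apply ih (pref ++ [query]) len _ hpre'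
        rw [List.countP_append, List.countP_append]
        simp [h1, h2]
        exact hlen

theorem main_loop (q : Int) : ∀ (ql : List (List Int)) (res digits : List Int),
    PreAux q digits.length ql →
    (ql.foldl (solveStep (solvePow q)) (res, digits, solveAltVal digits, (digits.length : Int) - 1)).1
      = (ql.foldl solveAltStep (res, digits)).1 := by
  intro ql
  induction ql with
  | nil => intro res digits _; rfl
  | cons query rest ih =>
    intro res digits hpre
    rw [List.foldl_cons, List.foldl_cons]
    by_cases h1 : PySem.List.pyGet? query 0 = some 1
    · have hA : solveStep (solvePow q) (res, digits, solveAltVal digits, (digits.length : Int) - 1) query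
          = (res, digits ++ [(PySem.List.pyGet? query 1).getD 0],
             solveAltVal (digits ++ [(PySem.List.pyGet? query 1).getD 0]),
             ((digits ++ [(PySem.List.pyGet? query 1).getD 0]).length : Int) - 1) := by
        simp [solveStep, h1, val_append]
      have hB : solveAltStep (res, digits) query
          = (res, digits ++ [(PySem.List.pyGet? query 1).getD 0]) := by
        simp [solveAltStep, h1]
      rw [hA, hB]
      apply ih
      have : PreAux q digits.length (query :: rest) = PreAux q (digits.length + 1) rest := by
        simp [PreAux, h1]
      simpa [List.length_append] using (this ▸ hpre)
    · by_cases h2 : PySem.List.pyGet? query 0 = some 2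
      · have hpre' : 1 ≤ digits.length ∧ ((digits.length : Int) - 1 ≤ max q 0) ∧
            PreAux q (digits.length - 1) rest := by
          have : PreAux q digits.length (query :: rest) =
              (1 ≤ digits.length ∧ ((digits.length : Int) - 1 ≤ max q 0) ∧
               PreAux q (digits.length - 1) rest) := by
            simp [PreAux, h1, h2]
          exact this ▸ hpre
        match digits, hpre' with
        | p :: restd, hpre' =>
          have hord : ((p :: restd).length : Int) - 1 = (restd.length : Int) := by
            simp
          have hpow : (PySem.List.pyGet? (solvePow q) ((restd.length : Nat) : Int)).getD 0
              = (10:Int) ^ restd.length % pvMOD := by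
            apply pow_get
            rw [← hord]; exact hpre'.2.1
          have hA : solveStep (solvePow q)
                (res, p :: restd, solveAltVal (p :: restd), ((p :: restd).length : Int) - 1) query
              = (res, restd, solveAltVal restd, (restd.length : Int) - 1) := by
            simp only [solveStep, h2, if_pos, hord, hpow]
            rw [val_pop]
            simp [h1]
          have hB : solveAltStep (res, p :: restd) query = (res, restd) := by
            simp [solveAltStep, h1, h2]
          rw [hA, hB]
          exact ih res restd (by simpa using hpre'.2.2)
      · have hA : solveStep (solvePow q) (res, digits, solveAltVal digits, (digits.length : Int) - 1) query
            = (res ++ [solveAltVal digits], digits, solveAltVal digits, (digits.length : Int) - 1) := by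
          simp [solveStep, h1, h2]
        have hB : solveAltStep (res, digits) query = (res ++ [solveAltVal digits], digits) := by
          simp [solveAltStep, h1, h2]
        rw [hA, hB]
        apply ih
        have : PreAux q digits.length (query :: rest) = PreAux q digits.length rest := by
          simp [PreAux, h1, h2]
        exact this ▸ hpre

-- ===== VERDICT (by name: the statement is the Claim_ definition above) =====
theorem solve_spec : Claim_equal_solve := by
  intro q ql _ hpre
  unfold Spec_solve solve solve_alt
  have h := main_loop q ql [] [1] (pre_to_aux q ql [] 1 (by simp) (by simpa using hpre))
  simpa [solveAltVal, PySem.Int.mod, pvMOD] using h
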